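-- pv_equiv track=rewrite | github.com/TurkuNLP/linewise_quality_filtering | src/label_lines_with_LLM.py | replace_synonyms
-- ===== SOURCE A (Python) =====
-- def replace_synonyms(synonyms, model_output):
--     # Create a mapping from synonym to its group for fast lookup
--     synonym_map = {
--         syn: group for group, members in synonyms.items() for syn in members
--     }
--
--     # Replace synonyms
--     for batch in model_output:
--         for key, label in batch.items():
--             if key == "line":
--                 continue
--             batch[key] = synonym_map.get(label, label)
--
--     return model_output
-- ===== SOURCE B (Python) =====
-- def replace_synonyms(synonyms, model_output):
--     groups = list(synonyms.items())
--
--     def canonical(label):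
--         # later groups take precedence over earlier ones, so search from the
--         # last group backwards and return the first hit
--         for group, members in reversed(groups):
--             if label in members:
--                 return group
--         return label
--
--     for batch in model_output:
--         for key in batch:
--             if key != "line":
--                 batch[key] = canonical(batch[key])
--     return model_output
-- ===== Notes on version B (the rewrite author's own statement) =====
-- stated objective: alternative
-- what changed: Drops the precomputed synonym->group inverse map entirely; each label is resolved on demand by a backward first-match search over the groups (later groups take precedence), with early return.
import Mathlib
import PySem

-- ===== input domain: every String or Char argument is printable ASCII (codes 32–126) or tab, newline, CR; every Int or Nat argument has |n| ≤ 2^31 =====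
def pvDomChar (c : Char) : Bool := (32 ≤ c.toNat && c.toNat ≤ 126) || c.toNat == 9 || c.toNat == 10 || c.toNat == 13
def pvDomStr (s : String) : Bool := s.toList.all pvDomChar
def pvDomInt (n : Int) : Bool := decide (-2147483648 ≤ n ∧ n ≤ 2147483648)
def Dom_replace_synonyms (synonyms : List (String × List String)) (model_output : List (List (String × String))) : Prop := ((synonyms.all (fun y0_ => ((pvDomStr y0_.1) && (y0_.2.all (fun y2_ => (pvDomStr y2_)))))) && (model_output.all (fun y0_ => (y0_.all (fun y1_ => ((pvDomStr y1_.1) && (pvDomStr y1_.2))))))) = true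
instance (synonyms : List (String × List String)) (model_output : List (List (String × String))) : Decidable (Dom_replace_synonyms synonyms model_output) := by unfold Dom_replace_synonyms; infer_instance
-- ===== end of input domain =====

-- B drops the precomputed synonym->group inverse map entirely: each label is resolved on
-- demand by a backward first-match search over the groups (later groups take precedence),
-- with early return. Both Pythons update the batch dicts in place and return the same
-- model_output object; the equivalence proved here is about the returned value.
-- ===== PORT A =====
def replace_synonyms (synonyms : List (String × List String)) (model_output : List (List (String × String))) : List (List (String × String)) :=
  -- synonym_map = {syn: group for group, members in synonyms.items() for syn in members}
  let synonym_map : PySem.Dict String String :=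
    synonyms.foldl (fun d gm => gm.2.foldl (fun d syn => d.insert syn gm.1) d) PySem.Dict.empty
  -- for batch in model_output: for key, label in batch.items(): skip "line" else batch[key] = synonym_map.get(label, label)
  model_output.map (fun batch =>
    batch.map (fun kl => if kl.1 == "line" then kl else (kl.1, synonym_map.getD kl.2 kl.2)))

-- ===== PORT B =====
-- canonical(label): backward search with early return — first group, from the end, whose
-- members contain label; else the label itself
def pvCanonical (groups : List (String × List String)) (label : String) : String :=
  match groups.reverse.find? (fun gm => gm.2.contains label) with
  | some gm => gm.1
  | none => label

def replace_synonyms_alt (synonyms : List (String × List String)) (model_output : List (List (String × String))) : List (List (String × String)) :=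
  model_output.map (fun batch =>
    batch.map (fun kl => if kl.1 != "line" then (kl.1, pvCanonical synonyms kl.2) else kl))

-- ===== PRECONDITION & SPEC =====
def Spec_replace_synonyms (synonyms : List (String × List String)) (model_output : List (List (String × String))) (out : List (List (String × String))) : Prop := out = replace_synonyms_alt synonyms model_output
instance (synonyms : List (String × List String)) (model_output : List (List (String × String))) (out : List (List (String × String))) : Decidable (Spec_replace_synonyms synonyms model_output out) := by unfold Spec_replace_synonyms; infer_instance

-- ===== CLAIM (what is proved, stated in full; the proofs are below) =====
def Claim_equal_replace_synonyms : Prop := ∀ (synonyms : List (String × List String)) (model_output : List (List (String × String))), Dom_replace_synonyms synonyms model_output → Spec_replace_synonyms synonyms model_output (replace_synonyms synonyms model_output)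

-- ===== LEMMAS AND PROOFS =====

-- inserting every member of one group: getD afterwards is the group iff the label is a member
theorem getD_foldl_insert_const (members : List String) (g lbl df : String) (d : PySem.Dict String String) :
    (members.foldl (fun d syn => d.insert syn g) d).getD lbl df
      = if lbl ∈ members then g else d.getD lbl df := by
  induction members generalizing d with
  | nil => simp
  | cons m ms ih =>
    simp only [List.foldl_cons, ih, PySem.Dict.getD_insert, List.mem_cons]
    by_cases h1 : lbl ∈ ms <;> by_cases h2 : lbl = m <;> simp [h1, h2]

-- the whole inverse-map build, as a last-wins fold over the groups
theorem getD_build_eq_scan (syns : List (String × List String)) (lbl df : String) (d : PySem.Dict String String) :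
    (syns.foldl (fun d gm => gm.2.foldl (fun d syn => d.insert syn gm.1) d) d).getD lbl df
      = syns.foldl (fun repl gm => if lbl ∈ gm.2 then gm.1 else repl) (d.getD lbl df) := by
  induction syns generalizing d with
  | nil => rfl
  | cons gm rest ih =>
    simp only [List.foldl_cons, ih, getD_foldl_insert_const]

-- the last-wins fold equals the backward first-match search
theorem scan_eq_canonical (syns : List (String × List String)) (lbl init : String) :
    syns.foldl (fun repl gm => if lbl ∈ gm.2 then gm.1 else repl) init
      = match syns.reverse.find? (fun gm => gm.2.contains lbl) with
        | some gm => gm.1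
        | none => init := by
  induction syns generalizing init with
  | nil => rfl
  | cons g rest ih =>
    simp only [List.foldl_cons, ih, List.reverse_cons, List.find?_append]
    cases h : rest.reverse.find? (fun gm => gm.2.contains lbl) with
    | some gm => simp [Option.orElse]
    | none =>
      by_cases hm : lbl ∈ g.2
      · simp [Option.orElse, List.find?, List.contains_iff_mem, hm]
      · have : g.2.contains lbl = false := by simpa [List.contains_iff_mem] using hm
        simp [Option.orElse, List.find?, this, hm]

-- ===== VERDICT (by name: the statement is the Claim_ definition above) =====
theorem replace_synonyms_spec : Claim_equal_replace_synonyms := by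
  intro synonyms model_output _
  unfold Spec_replace_synonyms replace_synonyms replace_synonyms_alt
  simp only [getD_build_eq_scan, PySem.Dict.getD_empty]
  refine List.map_congr_left (fun batch _ => List.map_congr_left (fun kl _ => ?_))
  rcases kl with ⟨k, lbl⟩
  by_cases hk : k = "line"
  · simp [hk]
  · simp [hk, scan_eq_canonical, pvCanonical]
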